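-- pv_equiv track=rewrite | github.com/shortcord/openautolink | bridge/openautolink/scripts/aa_bt_all.py | _sort_paired_devices
-- ===== SOURCE A (Python) =====
-- def _sort_paired_devices(devices, preferred_mac):
--     if not preferred_mac:
--         return devices
--     preferred = []
--     fallback = []
--     for device in devices:
--         if device[2] == preferred_mac:
--             preferred.append(device)
--         else:
--             fallback.append(device)
--     return preferred + fallback
-- ===== SOURCE B (Python) =====
-- def _sort_paired_devices(devices, preferred_mac):
--     if not preferred_mac:
--         return devices
--     return sorted(devices, key=lambda d: d[2] != preferred_mac)
-- ===== Notes on version B (the rewrite author's own statement) =====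
-- stated objective: idiomatic
-- what changed: Replaced the explicit two-bucket accumulation loop with a single stable sort on the boolean key (d[2] != preferred_mac), whose stability reproduces the preferred+fallback concatenation.
import Mathlib
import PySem

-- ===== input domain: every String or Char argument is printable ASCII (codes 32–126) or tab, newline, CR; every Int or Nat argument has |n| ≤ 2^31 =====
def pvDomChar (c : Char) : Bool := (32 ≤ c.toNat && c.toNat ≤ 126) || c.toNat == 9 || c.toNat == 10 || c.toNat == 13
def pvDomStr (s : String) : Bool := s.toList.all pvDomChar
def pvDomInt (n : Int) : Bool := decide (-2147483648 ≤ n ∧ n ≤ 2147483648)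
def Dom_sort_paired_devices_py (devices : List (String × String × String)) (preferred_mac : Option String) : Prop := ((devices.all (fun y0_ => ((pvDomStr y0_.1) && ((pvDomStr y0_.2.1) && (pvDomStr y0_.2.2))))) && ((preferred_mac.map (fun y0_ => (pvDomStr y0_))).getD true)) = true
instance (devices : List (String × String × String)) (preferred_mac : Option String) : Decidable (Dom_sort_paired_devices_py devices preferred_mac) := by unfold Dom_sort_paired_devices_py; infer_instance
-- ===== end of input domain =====

-- B replaces A's two-bucket accumulation loop with one stable sort on the boolean key
-- (device[2] != preferred_mac); same return value (idiomatic rewrite, no speed claim).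

-- ===== PORT A =====
-- two accumulators (preferred, fallback) filled left to right, then concatenated
def sort_paired_devices_py (devices : List (String × String × String)) (preferred_mac : Option String) : List (String × String × String) :=
  match preferred_mac with
  | none => devices
  | some pm =>
    if pm = "" then devices
    else
      let acc := devices.foldl
        (fun (acc : List (String × String × String) × List (String × String × String)) device =>
          if device.2.2 = pm then (acc.1 ++ [device], acc.2) else (acc.1, acc.2 ++ [device]))
        ([], [])
      acc.1 ++ acc.2

-- ===== PORT B =====
-- stable sort on the boolean key d[2] != preferred_mac (False sorts first)
def sort_paired_devices_py_alt (devices : List (String × String × String)) (preferred_mac : Option String) : List (String × String × String) :=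
  match preferred_mac with
  | none => devices
  | some pm =>
    if pm = "" then devices
    else PySem.List.sorted devices (fun d => d.2.2 != pm) false

-- ===== PRECONDITION & SPEC =====
def Spec_sort_paired_devices_py (devices : List (String × String × String)) (preferred_mac : Option String) (out : List (String × String × String)) : Prop := out = sort_paired_devices_py_alt devices preferred_mac
instance (devices : List (String × String × String)) (preferred_mac : Option String) (out : List (String × String × String)) : Decidable (Spec_sort_paired_devices_py devices preferred_mac out) := by unfold Spec_sort_paired_devices_py; infer_instance

-- ===== CLAIM (what is proved, stated in full; the proofs are below) =====
def Claim_equal_sort_paired_devices_py : Prop := ∀ (devices : List (String × String × String)) (preferred_mac : Option String), Dom_sort_paired_devices_py devices preferred_mac → Spec_sort_paired_devices_py devices preferred_mac (sort_paired_devices_py devices preferred_mac)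

-- ===== LEMMAS AND PROOFS =====

-- insertBy puts x right between a prefix it does not go before and a suffix it goes before
theorem insertBy_middle {α : Type} (before : α → α → Bool) (x : α) (p f : List α)
    (hp : ∀ y ∈ p, before x y = false) (hf : ∀ y ∈ f, before x y = true) :
    PySem.List.insertBy before x (p ++ f) = p ++ x :: f := by
  induction p with
  | nil =>
    cases f with
    | nil => rfl
    | cons y ys =>
      simp [PySem.List.insertBy, hf y (by simp)]
  | cons y ys ih =>
    have hy := hp y (by simp)
    simp [PySem.List.insertBy, hy, ih (fun z hz => hp z (by simp [hz]))]

-- invariant of the insertion-sort fold for a Bool-valued key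
theorem foldl_insertBy_bool {α : Type} (key : α → Bool) (xs p f : List α)
    (hp : ∀ y ∈ p, key y = false) (hf : ∀ y ∈ f, key y = true) :
    xs.foldl (fun acc x => PySem.List.insertBy (fun a b => decide (key a < key b)) x acc) (p ++ f)
      = (p ++ xs.filter (fun x => !key x)) ++ (f ++ xs.filter key) := by
  induction xs generalizing p f with
  | nil => simp
  | cons x xs ih =>
    by_cases hx : key x = true
    · have hstep : PySem.List.insertBy (fun a b => decide (key a < key b)) x (p ++ f)
          = p ++ (f ++ [x]) := by
        rw [← List.append_assoc]
        apply PySem.List.insertBy_of_forall_not_before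
        intro y hy
        simp [hx]
      simp only [List.foldl_cons, hstep]
      rw [ih p (f ++ [x]) hp (by intro y hy; rcases List.mem_append.1 hy with h | h
                                 · exact hf y h
                                 · simp at h; simpa [h])]
      simp [hx]
    · have hx' : key x = false := by simpa using hx
      have hstep : PySem.List.insertBy (fun a b => decide (key a < key b)) x (p ++ f)
          = (p ++ [x]) ++ f := by
        rw [List.append_assoc]
        apply insertBy_middle
        · intro y hy; simp [hx', hp y hy]
        · intro y hy; simp [hx', hf y hy]
      simp only [List.foldl_cons, hstep]
      rw [ih (p ++ [x]) f (by intro y hy; rcases List.mem_append.1 hy with h | h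
                              · exact hp y h
                              · simp at h; simpa [h]) hf]
      simp [hx']

-- the stable Bool-key sort is the two filtered halves
theorem sorted_bool_key {α : Type} (key : α → Bool) (xs : List α) :
    PySem.List.sorted xs key false = xs.filter (fun x => !key x) ++ xs.filter key := by
  rw [PySem.List.sorted_eq_foldl_insertBy]
  have h := foldl_insertBy_bool key xs [] [] (by simp) (by simp)
  simpa using h

-- A's two-bucket fold computes the two filtered halves
theorem bucket_fold (pm : String) (xs : List (String × String × String))
    (a b : List (String × String × String)) :
    xs.foldl
      (fun (acc : List (String × String × String) × List (String × String × String)) device =>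
        if device.2.2 = pm then (acc.1 ++ [device], acc.2) else (acc.1, acc.2 ++ [device]))
      (a, b)
      = (a ++ xs.filter (fun d => d.2.2 == pm), b ++ xs.filter (fun d => d.2.2 != pm)) := by
  induction xs generalizing a b with
  | nil => simp
  | cons x xs ih =>
    by_cases hx : x.2.2 = pm
    · simp [List.foldl_cons, hx, ih]
    · simp [List.foldl_cons, hx, ih]

-- ===== VERDICT (by name: the statement is the Claim_ definition above) =====
theorem sort_paired_devices_py_spec : Claim_equal_sort_paired_devices_py := by
  intro devices preferred_mac _
  unfold Spec_sort_paired_devices_py sort_paired_devices_py sort_paired_devices_py_alt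
  cases preferred_mac with
  | none => rfl
  | some pm =>
    by_cases hpm : pm = ""
    · simp [hpm]
    · simp only [hpm, if_false]
      rw [sorted_bool_key, bucket_fold]
      simp [bne]
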